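-- pv_equiv track=rewrite | github.com/Aitbytes/Securite-Cloud-Projet-Long | scripts/script.py | segment_markdown_by_heading1
-- ===== SOURCE A (Python) =====
-- from typing import Dict, List, Any
--
-- def segment_markdown_by_heading1(markdown):
--     """
--     Splits a markdown string into segments based on H1 headings.
--
--     Args:
--         markdown (str): The markdown string to segment.
--
--     Returns:
--         list: A list of segments, where each segment is a dictionary with a "title" and "content" key.
--     """
--
--     # Split the markdown by lines
--     lines : List[str] = markdown.split('\n')
--
--     # Initialize variables
--     segments = []
--     current_segment : List[str]= []
--
--     # Iterate over the lines
--     for line in lines: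
--         # If the line starts with an H1 heading
--         if line.startswith('# '):
--             # If there is a current segment, save it before starting a new one
--             if current_segment:
--                 segments.append({
--                     "title": current_segment[0].replace("# ", "").replace("**","").replace(" ","_").replace(",","_"),
--                     "content": '\n'.join(current_segment)
--                 })
--                 current_segment = []
--
--         # Add the line to the current segment
--         current_segment.append(line)
--
--     # Add the last segment if it exists
--     if current_segment:
--         segments.append({
--             "title": current_segment[0].replace("# ", "").replace("**","").replace(" ","_").replace(",","_"),
--             "content": '\n'.join(current_segment)
--         })
--         #.replaceAll("# ","").replaceAll("**","").replaceAll(" ","_").replaceAll(",","_")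
--
--     # Return the segments
--     return segments
-- ===== SOURCE B (Python) =====
-- def segment_markdown_by_heading1(markdown):
--     # Split points precomputed by an inner scan: each segment is a slice
--     # lines[i:j] where j is the next H1 boundary (or the end).
--     lines = markdown.split('\n')
--     segments = []
--     n = len(lines)
--     i = 0
--     while i < n:
--         j = i + 1
--         while j < n and not lines[j].startswith('# '):
--             j += 1
--         chunk = lines[i:j]
--         segments.append({
--             "title": chunk[0].replace("# ", "").replace("**", "").replace(" ", "_").replace(",", "_"),
--             "content": '\n'.join(chunk),
--         })
--         i = j
--     return segments
-- ===== Notes on version B (the rewrite author's own statement) =====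
-- stated objective: alternative
-- what changed: Replaces A's line-by-line accumulator loop (flush-on-heading with mutable current_segment state) by a split-point scan: an outer loop finds the next H1 boundary j with an inner scan and emits the slice lines[i:j] directly, with no carried segment state.
import Mathlib
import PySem

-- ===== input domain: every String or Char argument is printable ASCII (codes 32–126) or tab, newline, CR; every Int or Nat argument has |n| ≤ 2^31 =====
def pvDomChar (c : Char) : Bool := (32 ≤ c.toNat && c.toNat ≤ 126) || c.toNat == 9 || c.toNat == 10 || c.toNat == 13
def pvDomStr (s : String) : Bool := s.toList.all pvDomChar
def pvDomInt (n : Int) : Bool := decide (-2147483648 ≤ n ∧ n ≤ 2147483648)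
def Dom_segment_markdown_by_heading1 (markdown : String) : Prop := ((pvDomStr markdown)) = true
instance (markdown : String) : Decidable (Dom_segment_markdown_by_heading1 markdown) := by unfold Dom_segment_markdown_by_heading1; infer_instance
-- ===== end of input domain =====

-- B replaces A's flush-on-heading accumulator loop by a split-point scan that
-- slices each segment out directly (alternative decomposition, same cost).

-- Shared by both ports: the segment dict {"title": …, "content": …} that both
-- Pythons build with the identical expression (chunk[0].replace(…)… / '\n'.join).
def pvTitle (s : String) : String :=
  PySem.Str.replace (PySem.Str.replace (PySem.Str.replace (PySem.Str.replace s "# " "") "**" "") " " "_") "," "_"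

def pvSeg (chunk : List String) : List (String × String) :=
  [("title", pvTitle (chunk.headD "")), ("content", PySem.Str.join "\n" chunk)]

-- ===== PORT A =====
-- loop body of A: flush current_segment on an H1 line, then append the line
def pvStepA (acc : List (List (String × String)) × List String) (line : String) :
    List (List (String × String)) × List String :=
  if PySem.Str.startswith line "# " then
    if acc.2.isEmpty then (acc.1, acc.2 ++ [line])
    else (acc.1 ++ [pvSeg acc.2], [line])
  else (acc.1, acc.2 ++ [line])

def segment_markdown_by_heading1 (markdown : String) : List (List (String × String)) :=
  let lines := (PySem.Str.split? markdown "\n").getD []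
  let st := lines.foldl pvStepA ([], [])
  if st.2.isEmpty then st.1 else st.1 ++ [pvSeg st.2]

-- ===== PORT B =====
-- inner `while j < n and not lines[j].startswith('# ')` scan: returns the lines
-- skipped over and the remainder starting at the next H1 boundary
def pvScan (ls : List String) : List String × List String :=
  match ls with
  | [] => ([], [])
  | l :: rest =>
    if PySem.Str.startswith l "# " then ([], l :: rest)
    else
      let (t, r) := pvScan rest
      (l :: t, r)

theorem pvScan_snd_length (ls : List String) : (pvScan ls).2.length ≤ ls.length := by
  induction ls with
  | nil => simp [pvScan]
  | cons l rest ih =>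
    simp only [pvScan]
    split
    · simp
    · simpa using Nat.le_succ_of_le ih

-- outer `while i < n` loop: emit the slice lines[i:j], continue from j
def pvChunks (lines : List String) : List (List String) :=
  match lines with
  | [] => []
  | l :: rest =>
    (l :: (pvScan rest).1) :: pvChunks (pvScan rest).2
termination_by lines.length
decreasing_by
  exact Nat.lt_succ_of_le (pvScan_snd_length rest)

def segment_markdown_by_heading1_alt (markdown : String) : List (List (String × String)) :=
  (pvChunks ((PySem.Str.split? markdown "\n").getD [])).map pvSeg

-- ===== PRECONDITION & SPEC =====
def Spec_segment_markdown_by_heading1 (markdown : String) (out : List (List (String × String))) : Prop := out = segment_markdown_by_heading1_alt markdown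
instance (markdown : String) (out : List (List (String × String))) : Decidable (Spec_segment_markdown_by_heading1 markdown out) := by unfold Spec_segment_markdown_by_heading1; infer_instance

-- ===== CLAIM (what is proved, stated in full; the proofs are below) =====
def Claim_equal_segment_markdown_by_heading1 : Prop := ∀ (markdown : String), Dom_segment_markdown_by_heading1 markdown → Spec_segment_markdown_by_heading1 markdown (segment_markdown_by_heading1 markdown)

-- ===== LEMMAS AND PROOFS =====

-- tail of A's loop, expressed recursively: remaining lines + pending current_segment
def pvFin (cur : List String) (ls : List String) : List (List (String × String)) :=
  match ls with
  | [] => if cur.isEmpty then [] else [pvSeg cur]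
  | l :: rest =>
    if PySem.Str.startswith l "# " then
      if cur.isEmpty then pvFin (cur ++ [l]) rest
      else pvSeg cur :: pvFin [l] rest
    else pvFin (cur ++ [l]) rest

theorem foldl_pvStepA (ls : List String) : ∀ (segs : List (List (String × String))) (cur : List String),
    (if (ls.foldl pvStepA (segs, cur)).2.isEmpty then (ls.foldl pvStepA (segs, cur)).1
     else (ls.foldl pvStepA (segs, cur)).1 ++ [pvSeg (ls.foldl pvStepA (segs, cur)).2]) = segs ++ pvFin cur ls := by
  induction ls with
  | nil =>
    intro segs cur
    simp only [List.foldl_nil, pvFin]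
    by_cases hc : cur.isEmpty
    · simp [hc]
    · simp [hc]
  | cons l rest ih =>
    intro segs cur
    simp only [List.foldl_cons, pvStepA, pvFin]
    by_cases h : PySem.Str.startswith l "# " = true
    · by_cases hc : cur.isEmpty
      · simp only [h, hc, if_true]
        exact ih segs (cur ++ [l])
      · simp only [h, hc, if_true, Bool.false_eq_true, if_false]
        rw [ih (segs ++ [pvSeg cur]) [l]]
        simp
    · simp only [h, Bool.false_eq_true, if_false]
      exact ih segs (cur ++ [l])

theorem pvFin_nonempty (ls : List String) : ∀ (cur : List String), cur ≠ [] →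
    pvFin cur ls = pvSeg (cur ++ (pvScan ls).1) :: (pvChunks (pvScan ls).2).map pvSeg := by
  induction ls with
  | nil =>
    intro cur hcur
    simp [pvFin, pvScan, pvChunks, List.isEmpty_iff, hcur]
  | cons l rest ih =>
    intro cur hcur
    simp only [pvFin, pvScan]
    by_cases h : PySem.Str.startswith l "# " = true
    · simp only [h, if_true, List.isEmpty_iff, hcur, pvChunks]
      rw [ih [l] (by simp)]
      simp
    · simp only [h]
      rw [ih (cur ++ [l]) (by simp)]
      simp

theorem pvFin_nil_eq (lines : List String) :
    pvFin [] lines = (pvChunks lines).map pvSeg := by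
  cases lines with
  | nil => simp [pvFin, pvChunks]
  | cons l rest =>
    simp only [pvFin, List.isEmpty_nil, if_true, List.nil_append, pvChunks]
    by_cases h : PySem.Str.startswith l "# " = true
    · simp only [h, if_true]
      rw [pvFin_nonempty rest [l] (by simp)]
      simp
    · simp only [h]
      rw [pvFin_nonempty rest [l] (by simp)]
      simp

-- ===== VERDICT (by name: the statement is the Claim_ definition above) =====
theorem segment_markdown_by_heading1_spec : Claim_equal_segment_markdown_by_heading1 := by
  intro markdown _
  show segment_markdown_by_heading1 markdown = segment_markdown_by_heading1_alt markdown
  simp only [segment_markdown_by_heading1, segment_markdown_by_heading1_alt]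
  rw [foldl_pvStepA, pvFin_nil_eq]
  simp
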